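-- pv_equiv track=rewrite | github.com/alcedocoenen/MetaPlus | MVP01/2. SETUP/2.0 GUI/Flask app/validations.py | validated
-- ===== SOURCE A (Python) =====
-- def validated(pages):
--     # function to assure the entered numbers for the pages are correct.
--     # if not correct, it should be corrected automatically
--     # the return is a valid list of exluding numbers 1-7
--
--     #first check if pages is a list or not
--     # sample list
--     is_list = False
--     is_string = False
--     is_wrong = False
--
--     if isinstance(pages,list):
--         is_list = True
--     elif isinstance(pages,str):
--         is_string = True
--     else:
--         is_wrong = True
--
--     #if not a list but a string, then make a list
--     pages_list = []
--     if is_string: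
--         for i in pages:
--             j = int(i)
--             pages_list.append(j)
--         pages = pages_list
--         is_list = True
--         is_string = False
--
--     if is_list:
--         #check the validity of numbers
--         # if > 7 then replace by 7
--         temp_list = list(map(lambda x: 7 if x > 7 else x, pages))
--         # if = 0 the replace by 1
--         new_list = list(map(lambda x: 1 if x < 1 else x, temp_list))
--         pages = new_list
--
--         # check exclusivity
--         newList = []
--         for item in pages:
--             if item not in newList:
--                 newList.append(item)
--         pages = newList
--
--         #because of the uniqueness and value < 8, this list an only be 7 or shorter
--         # if too short, it needs to be extended with the missing numbers
--         if len(pages) < 7: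
--             validrange = range(7)
--             for x in validrange:
--                 if x+1 not in pages:
--                     pages.append(x+1)
--
--     if is_wrong:
--         pages = []
--
--     #return a string
--     result = ""
--     for x in pages:
--         result = result + str(x)
--
--     pages = result
--
--     return pages
-- ===== SOURCE B (Python) =====
-- def validated(pages):
--     # same type dispatch as the spec: str -> per-char ints, non-list/non-str -> empty
--     if isinstance(pages, str):
--         pages = [int(ch) for ch in pages]
--     elif not isinstance(pages, list):
--         return ""
--     # one pass: remember the index of the FIRST occurrence of each clamped value
--     n = len(pages)
--     first = {}
--     for i, x in enumerate(pages):
--         v = 7 if x > 7 else (1 if x < 1 else x)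
--         if v not in first:
--             first[v] = i
--     # result = digits 1..7 ranked by first occurrence; absent values rank after
--     # every index (n + v), i.e. at the end in ascending order
--     order = sorted(range(1, 8), key=lambda v: first.get(v, n + v))
--     return "".join(str(v) for v in order)
-- ===== Notes on version B (the rewrite author's own statement) =====
-- stated objective: alternative
-- what changed: B drops A's clamp maps, order-preserving dedup loop and missing-number fill loop entirely: one pass records the first-occurrence index of each clamped value in a dict, and the result is the digits 1..7 sorted by that rank (absent values ranked n+v, i.e. after every index, in ascending order); the single dict pass replaces A's two map passes plus the O(k)-membership dedup scan, a constant-factor speedup.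
import Mathlib
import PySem

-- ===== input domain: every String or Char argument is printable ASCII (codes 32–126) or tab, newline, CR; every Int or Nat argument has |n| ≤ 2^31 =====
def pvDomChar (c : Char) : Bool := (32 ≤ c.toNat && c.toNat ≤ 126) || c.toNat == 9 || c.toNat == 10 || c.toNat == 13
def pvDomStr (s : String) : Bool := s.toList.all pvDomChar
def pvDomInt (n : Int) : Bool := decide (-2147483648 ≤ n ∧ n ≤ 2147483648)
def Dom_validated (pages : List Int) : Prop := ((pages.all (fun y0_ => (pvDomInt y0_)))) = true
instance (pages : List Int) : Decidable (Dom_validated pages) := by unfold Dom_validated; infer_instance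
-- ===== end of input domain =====

-- B replaces A's staged list building (two clamp maps, order-preserving dedup loop,
-- missing-number fill loop) by a different algorithm: one pass records the first-occurrence
-- index of each clamped value in a dict, then 1..7 is sorted by that rank (objective: alternative).


-- ===== PORT A =====
-- transliteration of A's list branch (the Lean argument type is List Int, so
-- is_list is True and the string/wrong branches are dead)
def validated (pages : List Int) : String :=
  let temp_list := pages.map (fun x => if x > 7 then 7 else x)
  let new_list := temp_list.map (fun x => if x < 1 then 1 else x)
  let newList := new_list.foldl (fun acc item => if item ∈ acc then acc else acc ++ [item]) []
  let pages2 :=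
    if newList.length < 7 then
      (PySem.List.pyRange 0 7 1).foldl
        (fun acc x => if (x + 1) ∈ acc then acc else acc ++ [x + 1]) newList
    else newList
  pages2.foldl (fun result x => result ++ PySem.Int.toStr x) ""

-- ===== PORT B =====
def validated_alt (pages : List Int) : String :=
  let n : Int := pages.length
  let first := (PySem.List.enumerate pages).foldl
    (fun (d : PySem.Dict Int Int) (p : Int × Int) =>
      let v := if p.2 > 7 then 7 else if p.2 < 1 then 1 else p.2
      if (PySem.Dict.get? d v).isSome then d else PySem.Dict.insert d v p.1)
    PySem.Dict.empty
  let order := PySem.List.sorted (PySem.List.pyRange 1 8 1)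
    (fun v => PySem.Dict.getD first v (n + v)) false
  PySem.Str.join "" (order.map PySem.Int.toStr)

-- ===== PRECONDITION & SPEC =====
def Spec_validated (pages : List Int) (out : String) : Prop := out = validated_alt pages
instance (pages : List Int) (out : String) : Decidable (Spec_validated pages out) := by unfold Spec_validated; infer_instance

-- ===== CLAIM (what is proved, stated in full; the proofs are below) =====
def Claim_equal_validated : Prop := ∀ (pages : List Int), Dom_validated pages → Spec_validated pages (validated pages)

-- ===== LEMMAS AND PROOFS =====

-- A's fused clamp and the shared dedup step
def clampv (x : Int) : Int := if x > 7 then 7 else if x < 1 then 1 else x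

def dstep (acc : List Int) (v : Int) : List Int := if v ∈ acc then acc else acc ++ [v]

-- B's dict-building step
def bstep (d : PySem.Dict Int Int) (p : Int × Int) : PySem.Dict Int Int :=
  if (PySem.Dict.get? d (clampv p.2)).isSome then d else PySem.Dict.insert d (clampv p.2) p.1

lemma clampv_mem (x : Int) : 1 ≤ clampv x ∧ clampv x ≤ 7 := by
  unfold clampv; split_ifs <;> omega

-- A's two clamp maps compose to the fused clamp
lemma clamp_fuse (x : Int) :
    (if (if x > 7 then (7:Int) else x) < 1 then (1:Int) else (if x > 7 then 7 else x))
      = clampv x := by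
  unfold clampv; split_ifs <;> omega

-- elements of the dedup fold come from acc or the list
lemma dedup_mem (l : List Int) : ∀ acc y, y ∈ l.foldl dstep acc → y ∈ acc ∨ y ∈ l := by
  induction l with
  | nil => intro acc y h; simp at h; exact Or.inl h
  | cons c l ih =>
    intro acc y h
    simp only [List.foldl_cons, dstep] at h
    split_ifs at h with hm
    · rcases ih acc y h with h' | h' <;> simp [h']
    · rcases ih _ y h with h' | h'
      · rcases List.mem_append.1 h' with h'' | h'' <;> simp_all
      · simp [h']

-- fold that appends unseen candidates, over Nodup candidates, is append-filter
lemma fill_fold (l : List Int) (hn : l.Nodup) (base : List Int) :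
    l.foldl dstep base = base ++ l.filter (fun c => c ∉ base) := by
  induction l generalizing base with
  | nil => simp
  | cons c l ih =>
    have hc : c ∉ l := (List.nodup_cons.1 hn).1
    have hn' : l.Nodup := (List.nodup_cons.1 hn).2
    simp only [List.foldl_cons, dstep]
    split_ifs with hm
    · rw [ih hn' base]
      congr 1
      simp [hm]
    · rw [ih hn' (base ++ [c])]
      have hfilt : l.filter (fun y => decide (y ∉ base ++ [c])) = l.filter (fun y => decide (y ∉ base)) := by
        apply List.filter_congr
        intro y hy
        have : y ≠ c := fun h => hc (h ▸ hy)
        simp [List.mem_append, this]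
      rw [hfilt]
      simp [hm]

-- the joint invariant of B's dict fold: its keys are exactly A's dedup list of the
-- clamped values (in order), keys stay Nodup, stored indices are < the running index,
-- and stored indices strictly increase along the items list
lemma build_inv (l : List Int) : ∀ (s : Int) (f : PySem.Dict Int Int),
    f.keys.Nodup → (∀ p ∈ f.items, p.2 < s) → f.items.Pairwise (fun p q => p.2 < q.2) →
    ((PySem.List.enumerate l s).foldl bstep f).keys = (l.map clampv).foldl dstep f.keys
    ∧ ((PySem.List.enumerate l s).foldl bstep f).keys.Nodup
    ∧ (∀ p ∈ ((PySem.List.enumerate l s).foldl bstep f).items, p.2 < s + l.length)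
    ∧ ((PySem.List.enumerate l s).foldl bstep f).items.Pairwise (fun p q => p.2 < q.2) := by
  induction l with
  | nil =>
    intro s f h1 h2 h3
    exact ⟨rfl, h1, fun p hp => by simpa using h2 p hp, h3⟩
  | cons x l ih =>
    intro s f h1 h2 h3
    rw [PySem.List.enumerate_cons]
    simp only [List.foldl_cons, List.map_cons]
    by_cases hm : clampv x ∈ f.keys
    · have hget : (PySem.Dict.get? f (clampv x)).isSome := by
        rw [← PySem.Dict.contains_eq_isSome_get?]
        exact (PySem.Dict.contains_iff_mem_keys f _).2 hm
      have hb : bstep f (s, x) = f := by unfold bstep; simp [hget]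
      have hd : dstep f.keys (clampv x) = f.keys := by unfold dstep; simp [hm]
      rw [hb, hd]
      have h2' : ∀ p ∈ f.items, p.2 < s + 1 := fun p hp => lt_trans (h2 p hp) (by omega)
      obtain ⟨a, b, c, d⟩ := ih (s + 1) f h1 h2' h3
      refine ⟨a, b, fun p hp => ?_, d⟩
      have := c p hp
      simp only [List.length_cons] at ⊢
      push_cast at this ⊢
      omega
    · have hcont : f.contains (clampv x) = false := by
        by_contra h
        exact hm ((PySem.Dict.contains_iff_mem_keys f _).1 (by simpa using h))
      have hget : (PySem.Dict.get? f (clampv x)).isSome = false := by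
        rw [← PySem.Dict.contains_eq_isSome_get?]; exact hcont
      have hb : bstep f (s, x) = PySem.Dict.insert f (clampv x) s := by
        unfold bstep; simp [hget]
      have hd : dstep f.keys (clampv x) = f.keys ++ [clampv x] := by unfold dstep; simp [hm]
      rw [hb, hd]
      have hkeys : (PySem.Dict.insert f (clampv x) s).keys = f.keys ++ [clampv x] :=
        PySem.Dict.keys_insert_of_not_contains f s hcont
      have hitems : (PySem.Dict.insert f (clampv x) s).items = f.items ++ [(clampv x, s)] :=
        PySem.Dict.items_insert_of_not_contains f s hcont
      have h1' : (PySem.Dict.insert f (clampv x) s).keys.Nodup := by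
        rw [hkeys, List.nodup_append]
        refine ⟨h1, by simp, ?_⟩
        intro a ha b hb hab
        have hb' : b = clampv x := by simpa using hb
        exact hm ((hab.trans hb') ▸ ha)
      have h2' : ∀ p ∈ (PySem.Dict.insert f (clampv x) s).items, p.2 < s + 1 := by
        intro p hp
        rw [hitems] at hp
        rcases List.mem_append.1 hp with h | h
        · exact lt_trans (h2 p h) (by omega)
        · simp at h; rw [h]; omega
      have h3' : (PySem.Dict.insert f (clampv x) s).items.Pairwise (fun p q => p.2 < q.2) := by
        rw [hitems, List.pairwise_append]
        refine ⟨h3, by simp, ?_⟩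
        intro p hp q hq
        simp at hq; rw [hq]
        exact h2 p hp
      obtain ⟨a, b, c, d⟩ := ih (s + 1) _ h1' h2' h3'
      rw [hkeys] at a
      refine ⟨a, b, fun p hp => ?_, d⟩
      have := c p hp
      simp only [List.length_cons] at ⊢
      push_cast at this ⊢
      omega

-- dedup ++ ascending fill of the untouched values is a permutation of the full range
lemma perm_fill (d s : List Int) (hd : d.Nodup) (hs : s.Nodup) (hsub : ∀ x ∈ d, x ∈ s) :
    (d ++ s.filter (fun c => c ∉ d)).Perm s := by
  rw [List.perm_iff_count]
  intro a
  rw [List.count_append]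
  by_cases had : a ∈ d
  · have h0 : (s.filter (fun c => decide (c ∉ d))).count a = 0 := by
      rw [List.count_eq_zero]
      intro h
      have := List.of_mem_filter h
      simp at this
      exact this had
    rw [List.count_eq_one_of_mem hd had, h0, List.count_eq_one_of_mem hs (hsub a had)]
  · rw [List.count_eq_zero_of_not_mem had]
    by_cases has : a ∈ s
    · have hmf : a ∈ s.filter (fun c => decide (c ∉ d)) :=
        List.mem_filter.2 ⟨has, by simpa using had⟩
      rw [List.count_eq_one_of_mem (hs.filter _) hmf, List.count_eq_one_of_mem hs has]
    · rw [List.count_eq_zero_of_not_mem has,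
        List.count_eq_zero_of_not_mem (fun h => has (List.mem_of_mem_filter h))]

-- string concatenation fold is join of the stringified list
lemma concat_fold (l : List Int) (s : String) :
    (l.foldl (fun result x => result ++ PySem.Int.toStr x) s).toList
      = s.toList ++ (l.map (fun x => (PySem.Int.toStr x).toList)).flatten := by
  induction l generalizing s with
  | nil => simp
  | cons c l ih => simp [ih, List.append_assoc]

lemma join_nil_flatten (parts : List (List Char)) :
    PySem.Chars.join [] parts = parts.flatten := by
  induction parts with
  | nil => simp [PySem.Chars.join_nil]
  | cons p rest ih =>
    cases rest with
    | nil => simp [PySem.Chars.join_singleton]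
    | cons q r => simp [PySem.Chars.join_cons_cons, ih]

lemma seven_list : PySem.List.pyRange 1 8 1 = ([1,2,3,4,5,6,7] : List Int) := by decide

lemma range_map_succ :
    (PySem.List.pyRange 0 7 1).map (fun x => x + 1) = PySem.List.pyRange 1 8 1 := by decide

theorem validated_spec_aux (pages : List Int) : validated pages = validated_alt pages := by
  unfold validated validated_alt
  set n : Int := (pages.length : Int) with hn
  -- A's double map is the map of the fused clamp, and A's dedup lambda is dstep
  have hmaps : (pages.map (fun x => if x > 7 then (7:Int) else x)).map
        (fun x => if x < 1 then (1:Int) else x) = pages.map clampv := by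
    rw [List.map_map]
    exact List.map_congr_left (fun x _ => clamp_fuse x)
  have hA : (fun (acc : List Int) (item : Int) => if item ∈ acc then acc else acc ++ [item])
      = dstep := rfl
  simp only [hmaps, hA]
  -- B's fold is the bstep fold
  have hbfold : (PySem.List.enumerate pages).foldl
      (fun (d : PySem.Dict Int Int) (p : Int × Int) =>
        let v := if p.2 > 7 then 7 else if p.2 < 1 then 1 else p.2
        if (PySem.Dict.get? d v).isSome then d else PySem.Dict.insert d v p.1)
      PySem.Dict.empty
      = (PySem.List.enumerate pages).foldl bstep PySem.Dict.empty := rfl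
  rw [hbfold]
  -- the invariant at the end of the scan
  obtain ⟨hkeys, hnodup, hbound, hpair⟩ := build_inv pages 0 PySem.Dict.empty
    (by simp) (by intro p hp; simp [PySem.Dict.empty] at hp) (by simp [PySem.Dict.empty])
  set f := (PySem.List.enumerate pages).foldl bstep PySem.Dict.empty with hf
  have hkeys' : f.keys = (pages.map clampv).foldl dstep [] := by
    rw [hkeys, PySem.Dict.keys_empty]
  set d := (pages.map clampv).foldl dstep [] with hdd
  have hdnodup : d.Nodup := hkeys' ▸ hnodup
  -- present values look up to their first index < n; absent values get n + v
  have hkd : ∀ v ∈ d, PySem.Dict.getD f v (n + v) < n := by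
    intro v hv
    rw [← hkeys'] at hv
    have hv' : v ∈ f.items.map Prod.fst := by simpa [PySem.Dict.keys] using hv
    obtain ⟨p, hpi, hfst⟩ := List.mem_map.1 hv'
    have hp2 : (v, p.2) ∈ f.items := by rw [← hfst]; exact hpi
    have hgd := PySem.Dict.getD_of_mem_items f hp2 hnodup (n + v)
    rw [hgd]
    have hb := hbound p hpi
    rw [hn]
    omega
  have hkmiss : ∀ v, v ∉ d → PySem.Dict.getD f v (n + v) = n + v := by
    intro v hv
    rw [← hkeys'] at hv
    have hnone : f.get? v = none := (PySem.Dict.get?_eq_none_iff_not_mem_keys f v).2 hv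
    exact PySem.Dict.getD_of_get?_eq_none f (n + v) hnone
  -- d is strictly increasing under the key
  have hitemsp : f.items.Pairwise
      (fun p q => PySem.Dict.getD f p.1 (n + p.1) < PySem.Dict.getD f q.1 (n + q.1)) := by
    refine hpair.imp_of_mem ?_
    intro p q hp hq hlt
    have hgp := PySem.Dict.getD_of_mem_items f (show (p.1, p.2) ∈ f.items from hp) hnodup (n + p.1)
    have hgq := PySem.Dict.getD_of_mem_items f (show (q.1, q.2) ∈ f.items from hq) hnodup (n + q.1)
    rw [hgp, hgq]
    exact hlt
  have hdpair : d.Pairwise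
      (fun a b => PySem.Dict.getD f a (n + a) < PySem.Dict.getD f b (n + b)) := by
    rw [← hkeys']
    simp only [PySem.Dict.keys]
    exact List.pairwise_map.2 hitemsp
  -- d's elements lie in 1..7
  have hsub : ∀ x ∈ d, x ∈ ([1,2,3,4,5,6,7] : List Int) := by
    intro y hy
    rcases dedup_mem _ [] y (hdd ▸ hy) with h | h
    · simp at h
    · rcases List.mem_map.1 h with ⟨x, _, hx⟩
      subst hx
      have := clampv_mem x
      simp only [List.mem_cons, List.not_mem_nil, or_false]
      omega
  set miss := ([1,2,3,4,5,6,7] : List Int).filter (fun c => c ∉ d) with hmiss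
  have hperm : (d ++ miss).Perm ([1,2,3,4,5,6,7] : List Int) :=
    perm_fill d _ hdnodup (by decide) hsub
  -- A's fill fold produces d ++ miss
  have hfillA : (PySem.List.pyRange 0 7 1).foldl
        (fun acc x => if (x + 1) ∈ acc then acc else acc ++ [x + 1]) d = d ++ miss := by
    have h1 : (PySem.List.pyRange 0 7 1).foldl
        (fun acc x => if (x + 1) ∈ acc then acc else acc ++ [x + 1]) d
        = ((PySem.List.pyRange 0 7 1).map (fun x => x + 1)).foldl dstep d := by
      rw [List.foldl_map]; rfl
    rw [h1, range_map_succ, seven_list]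
    exact fill_fold _ (by decide) d
  -- d ++ miss is strictly increasing under the key
  have hpairAll : (d ++ miss).Pairwise
      (fun a b => PySem.Dict.getD f a (n + a) < PySem.Dict.getD f b (n + b)) := by
    rw [List.pairwise_append]
    refine ⟨hdpair, ?_, ?_⟩
    · have hm7 : miss.Pairwise (· < ·) := by
        rw [hmiss]
        exact List.Pairwise.filter _ (by decide)
      refine hm7.imp_of_mem ?_
      intro a b ha hb hab
      have ha' : a ∉ d := by simpa using List.of_mem_filter ha
      have hb' : b ∉ d := by simpa using List.of_mem_filter hb
      rw [hkmiss a ha', hkmiss b hb']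
      omega
    · intro a ha b hb
      have hb' : b ∉ d := by simpa using List.of_mem_filter hb
      have hb1 : (1:Int) ≤ b := by
        have hbm := List.mem_of_mem_filter hb
        simp only [List.mem_cons, List.not_mem_nil, or_false] at hbm
        omega
      rw [hkmiss b hb']
      have := hkd a ha
      omega
  -- hence B's sorted range is exactly d ++ miss
  have hsorted : PySem.List.sorted (PySem.List.pyRange 1 8 1)
      (fun v => PySem.Dict.getD f v (n + v)) false = d ++ miss := by
    rw [seven_list]
    exact PySem.List.sorted_eq_of_perm_of_pairwise_lt _ _ _ hperm hpairAll
  rw [hsorted]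
  -- compare the final strings via toList
  apply String.toList_injective
  rw [concat_fold]
  have hjoin : (PySem.Str.join "" ((d ++ miss).map PySem.Int.toStr)).toList
      = ((d ++ miss).map (fun x => (PySem.Int.toStr x).toList)).flatten := by
    unfold PySem.Str.join
    rw [String.toList_ofList]
    simp only [String.toList_empty]
    rw [join_nil_flatten, List.map_map]
    rfl
  rw [hjoin]
  by_cases hl : d.length < 7
  · rw [if_pos hl, hfillA]; simp
  · rw [if_neg hl]
    have hlen : d.length ≤ 7 := by
      have := (List.Nodup.subperm hdnodup hsub).length_le
      simpa using this
    have hlen7 : d.length = 7 := le_antisymm hlen (le_of_not_gt hl)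
    have hperm7 : List.Perm d ([1,2,3,4,5,6,7] : List Int) :=
      (List.Nodup.subperm hdnodup hsub).perm_of_length_le (by simp [hlen7])
    have hfilt : miss = [] := by
      rw [hmiss]
      apply List.filter_eq_nil_iff.2
      intro c hc
      simpa using hperm7.mem_iff.2 hc
    rw [hfilt]
    simp

-- ===== VERDICT (by name: the statement is the Claim_ definition above) =====
theorem validated_spec : Claim_equal_validated := by
  intro pages _
  unfold Spec_validated
  exact validated_spec_aux pages
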